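-- pv_equiv track=rewrite | github.com/dhanoosh2410/FYP-25-S3-11_Picteractive_SourceCode | server/story_gen.py | _clean_title_terms
-- ===== SOURCE A (Python) =====
-- from typing import List, Optional, Dict, Any, Tuple
--
-- PEOPLE  = {"boy","girl","man","woman","child","kid","baby","person","friend"}
--
-- ANIMALS = {"dog","cat","bird","duck","rabbit","fish","worm"}
--
-- PLACES  = {"park","school","home","house","room","kitchen","garden","forest","beach","playground","tree"}
--
-- OBJECTS = {
--     "apple","banana","ball","kite","car","bus","bicycle","train","boat","airplane","plane",
--     "tree","flower","book","cake","cookie","pizza","guitar","chair","table","bed","umbrella","leaf","shoe","hat"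
-- }
--
-- COLOR_WORDS = {"red","green","blue","yellow","black","white","brown","pink","purple","orange"}
--
-- TITLE_BLOCKLIST = {"table"}  # avoid odd titles unless central
--
-- def _clean_title_terms(terms: List[str]) -> List[str]:
--     out=[]
--     for t in terms:
--         if not t or t in COLOR_WORDS or t in TITLE_BLOCKLIST:
--             continue
--         if t in PLACES and t != "tree":
--             continue
--         out.append(t)
--     prio=lambda x: (0 if x in (PEOPLE|ANIMALS) else (1 if x in OBJECTS else 2))
--     out=sorted(list(dict.fromkeys(out)), key=prio)
--     return out
-- ===== SOURCE B (Python) =====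
-- # One flattened skip-set + two rank tables; bucket-distribute into a tuple of
-- # three lists in a single pass (bucket sort replacing A's comparison sort).
-- _SKIP = {
--     "red","green","blue","yellow","black","white","brown","pink","purple","orange",
--     "table",
--     "park","school","home","house","room","kitchen","garden","forest","beach","playground",
-- }
-- _RANK0 = {
--     "baby","bird","boy","cat","child","dog","duck","fish","friend","girl",
--     "kid","man","person","rabbit","woman","worm",
-- }
-- _RANK1 = {
--     "airplane","apple","ball","banana","bed","bicycle","boat","book","bus","cake",
--     "car","chair","cookie","flower","guitar","hat","kite","leaf","pizza","plane",
--     "shoe","table","train","tree","umbrella",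
-- }
--
-- def _rank(t):
--     if t in _RANK0:
--         return 0
--     if t in _RANK1:
--         return 1
--     return 2
--
-- def _clean_title_terms(terms):
--     buckets = ([], [], [])
--     seen = set()
--     for t in terms:
--         if t and t not in seen:
--             seen.add(t)
--             if t not in _SKIP:
--                 buckets[_rank(t)].append(t)
--     return buckets[0] + buckets[1] + buckets[2]
-- ===== Notes on version B (the rewrite author's own statement) =====
-- stated objective: alternative
-- what changed: Replaces A's filter-then-dict.fromkeys-then-stable-sort pipeline with a single pass over one flattened skip set and two precomputed rank tables, deduping with a seen-set and distributing each surviving term into a tuple of three priority buckets returned as bucket0+bucket1+bucket2 (a bucket sort replacing the comparison sort).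
import Mathlib
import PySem

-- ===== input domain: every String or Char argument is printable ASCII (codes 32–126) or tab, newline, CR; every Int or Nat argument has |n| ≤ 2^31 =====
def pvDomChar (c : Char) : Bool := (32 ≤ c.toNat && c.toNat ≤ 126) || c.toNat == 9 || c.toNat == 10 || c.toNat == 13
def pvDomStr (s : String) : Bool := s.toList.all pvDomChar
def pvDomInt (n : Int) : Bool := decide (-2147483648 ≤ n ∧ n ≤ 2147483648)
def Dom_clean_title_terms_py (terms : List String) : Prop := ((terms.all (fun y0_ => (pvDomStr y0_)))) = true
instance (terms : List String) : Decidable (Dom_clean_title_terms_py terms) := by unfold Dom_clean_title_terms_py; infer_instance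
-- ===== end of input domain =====

-- B replaces A's filter → dict.fromkeys → stable-sort pipeline by a single pass over a
-- flattened skip set and two rank tables, distributing into a tuple of three buckets
-- (bucket sort by the 3-valued priority); same return value.

-- ===== PORT A =====
def pvPEOPLE : PySem.Set String :=
  ["boy","girl","man","woman","child","kid","baby","person","friend"]
def pvANIMALS : PySem.Set String :=
  ["dog","cat","bird","duck","rabbit","fish","worm"]
def pvPLACES : PySem.Set String :=
  ["park","school","home","house","room","kitchen","garden","forest","beach","playground","tree"]
def pvOBJECTS : PySem.Set String :=
  ["apple","banana","ball","kite","car","bus","bicycle","train","boat","airplane","plane",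
   "tree","flower","book","cake","cookie","pizza","guitar","chair","table","bed","umbrella","leaf","shoe","hat"]
def pvCOLOR_WORDS : PySem.Set String :=
  ["red","green","blue","yellow","black","white","brown","pink","purple","orange"]
def pvTITLE_BLOCKLIST : PySem.Set String := ["table"]

-- prio = lambda x: 0 if x in PEOPLE|ANIMALS else (1 if x in OBJECTS else 2)
def pvPrio (x : String) : Int :=
  if pvPEOPLE.contains x || pvANIMALS.contains x then 0
  else if pvOBJECTS.contains x then 1 else 2

def clean_title_terms_py (terms : List String) : List String :=
  let out : List String := terms.foldl (fun acc t =>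
    if t = "" || pvCOLOR_WORDS.contains t || pvTITLE_BLOCKLIST.contains t then acc
    else if pvPLACES.contains t && t != "tree" then acc
    else acc ++ [t]) []
  PySem.List.sorted (PySem.List.dedup out) pvPrio

-- ===== PORT B =====
-- Source B's module tables: _SKIP = COLOR_WORDS+blocklist+places-except-"tree" flattened,
-- _RANK0 / _RANK1 alphabetically listed
def altSkip : List String :=
  ["red","green","blue","yellow","black","white","brown","pink","purple","orange",
   "table",
   "park","school","home","house","room","kitchen","garden","forest","beach","playground"]
def altRank0 : List String :=
  ["baby","bird","boy","cat","child","dog","duck","fish","friend","girl",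
   "kid","man","person","rabbit","woman","worm"]
def altRank1 : List String :=
  ["airplane","apple","ball","banana","bed","bicycle","boat","book","bus","cake",
   "car","chair","cookie","flower","guitar","hat","kite","leaf","pizza","plane",
   "shoe","table","train","tree","umbrella"]

-- def _rank(t)
def altRank (t : String) : Nat :=
  if altRank0.contains t then 0
  else if altRank1.contains t then 1
  else 2

-- the for-loop of Source B: seen-set + a tuple of three buckets, then b0 + b1 + b2
def altLoop : List String → PySem.Set String →
    List String × List String × List String → List String
  | [], _, bs => bs.1 ++ bs.2.1 ++ bs.2.2
  | t :: rest, seen, bs =>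
    if t ≠ "" ∧ seen.contains t = false then
      let seen' := PySem.Set.add seen t
      let bs' :=
        if altSkip.contains t = false then
          match altRank t with
          | 0 => (bs.1 ++ [t], bs.2.1, bs.2.2)
          | 1 => (bs.1, bs.2.1 ++ [t], bs.2.2)
          | _ => (bs.1, bs.2.1, bs.2.2 ++ [t])
        else bs
      altLoop rest seen' bs'
    else altLoop rest seen bs

def clean_title_terms_py_alt (terms : List String) : List String :=
  altLoop terms PySem.Set.empty ([], [], [])

-- ===== PRECONDITION & SPEC =====
def Spec_clean_title_terms_py (terms : List String) (out : List String) : Prop := out = clean_title_terms_py_alt terms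
instance (terms : List String) (out : List String) : Decidable (Spec_clean_title_terms_py terms out) := by unfold Spec_clean_title_terms_py; infer_instance

-- ===== CLAIM (what is proved, stated in full; the proofs are below) =====
def Claim_equal_clean_title_terms_py : Prop := ∀ (terms : List String), Dom_clean_title_terms_py terms → Spec_clean_title_terms_py terms (clean_title_terms_py terms)

-- ===== LEMMAS AND PROOFS =====

-- the non-emptiness-independent part of A's keep condition, and the full condition
def pvKeep2 (t : String) : Bool :=
  !(pvCOLOR_WORDS.contains t || pvTITLE_BLOCKLIST.contains t) && !(pvPLACES.contains t && t != "tree")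
def pvKeep (t : String) : Bool := (t != "") && pvKeep2 t

-- the survivors of B's seen-set dedup (nonempty first occurrences not already seen)
def pvSurv (seen : List String) : List String → List String
  | [] => []
  | t :: rest => if t = "" || seen.contains t then pvSurv seen rest
                 else t :: pvSurv (seen ++ [t]) rest

-- BRIDGES between B's flattened tables and A's sets
theorem pv_skip_eq (t : String) :
    altSkip.contains t
      = (pvCOLOR_WORDS.contains t || pvTITLE_BLOCKLIST.contains t
         || (pvPLACES.contains t && t != "tree")) := by
  rw [Bool.eq_iff_iff]
  simp [altSkip, pvCOLOR_WORDS, pvTITLE_BLOCKLIST, pvPLACES]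
  constructor
  · rintro (rfl|rfl|rfl|rfl|rfl|rfl|rfl|rfl|rfl|rfl|rfl|rfl|rfl|rfl|rfl|rfl|rfl|rfl|rfl|rfl|rfl) <;> decide
  · rintro (((rfl|rfl|rfl|rfl|rfl|rfl|rfl|rfl|rfl|rfl)|rfl)|⟨(rfl|rfl|rfl|rfl|rfl|rfl|rfl|rfl|rfl|rfl|rfl),hne⟩) <;>
      first | decide | exact absurd rfl hne

theorem pv_skip_keep2 (t : String) : altSkip.contains t = !pvKeep2 t := by
  rw [pv_skip_eq, pvKeep2]
  cases pvCOLOR_WORDS.contains t <;> cases pvTITLE_BLOCKLIST.contains t <;>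
    cases hp : (pvPLACES.contains t && t != "tree") <;> simp [hp]

theorem pv_rank0_eq (t : String) :
    altRank0.contains t = (pvPEOPLE.contains t || pvANIMALS.contains t) := by
  rw [Bool.eq_iff_iff]
  simp [altRank0, pvPEOPLE, pvANIMALS]
  tauto

theorem pv_rank1_eq (t : String) : altRank1.contains t = pvOBJECTS.contains t := by
  rw [Bool.eq_iff_iff]
  simp [altRank1, pvOBJECTS]
  tauto

theorem pvA_body_eq (acc : List String) (t : String) :
    (if t = "" || pvCOLOR_WORDS.contains t || pvTITLE_BLOCKLIST.contains t then acc
     else if pvPLACES.contains t && t != "tree" then acc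
     else acc ++ [t]) = (if pvKeep t then acc ++ [t] else acc) := by
  by_cases he : t = "" <;>
    by_cases hcb : (t ∈ pvCOLOR_WORDS ∨ t ∈ pvTITLE_BLOCKLIST) <;>
    by_cases hptr : (t ∈ pvPLACES ∧ ¬ t = "tree") <;>
    (simp [pvKeep, pvKeep2, he, hcb, hptr]; try tauto)

theorem pvSurv_skip {seen : List String} {t : String} (rest : List String)
    (h : t = "" ∨ t ∈ seen) : pvSurv seen (t :: rest) = pvSurv seen rest := by
  rcases h with h | h <;> simp [pvSurv, h]

theorem pvSurv_cons {seen : List String} {t : String} (rest : List String)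
    (h1 : ¬ t = "") (h2 : t ∉ seen) :
    pvSurv seen (t :: rest) = t :: pvSurv (seen ++ [t]) rest := by
  simp [pvSurv, h1, h2]

-- A's dict.fromkeys over the filtered list computes the pvKeep2-filter of B's survivors
theorem pvSurv_invariant (terms : List String) :
    ∀ (acc seen : List String),
      (∀ t, pvKeep t = true → (t ∈ acc ↔ t ∈ seen)) →
      List.foldl PySem.Set.add acc (terms.filter pvKeep)
        = acc ++ (pvSurv seen terms).filter pvKeep2 := by
  induction terms with
  | nil => intro acc seen _; simp [pvSurv]
  | cons t rest ih =>
    intro acc seen hinv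
    by_cases hk : pvKeep t = true
    · have hke : ¬ t = "" ∧ pvKeep2 t = true := by simpa [pvKeep] using hk
      rw [List.filter_cons_of_pos hk, List.foldl_cons]
      by_cases hs : t ∈ seen
      · have hacc : t ∈ acc := (hinv t hk).mpr hs
        rw [pvSurv_skip rest (Or.inr hs),
            show PySem.Set.add acc t = acc from by simp [PySem.Set.add, hacc]]
        exact ih acc seen hinv
      · have hacc : t ∉ acc := fun h => hs ((hinv t hk).mp h)
        rw [pvSurv_cons rest hke.1 hs,
            show PySem.Set.add acc t = acc ++ [t] from by simp [PySem.Set.add, hacc],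
            List.filter_cons_of_pos hke.2,
            ih (acc ++ [t]) (seen ++ [t]) (by intro u hu; simp [hinv u hu])]
        simp
    · have hk' : pvKeep t = false := by simpa using hk
      rw [List.filter_cons_of_neg (by simp [hk'])]
      by_cases he : t = ""
      · rw [pvSurv_skip rest (Or.inl he)]; exact ih acc seen hinv
      · by_cases hs : t ∈ seen
        · rw [pvSurv_skip rest (Or.inr hs)]; exact ih acc seen hinv
        · have hk2f : pvKeep2 t = false := by
            have := hk'
            simp only [pvKeep, Bool.and_eq_false_iff] at this
            rcases this with h | h
            · exact absurd (by simpa using h) (by simpa using he)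
            · exact h
          rw [pvSurv_cons rest he hs, List.filter_cons_of_neg (by simp [hk2f])]
          refine ih acc (seen ++ [t]) ?_
          intro u hu
          have hut : u ≠ t := fun h => by subst h; rw [hu] at hk'; cases hk'
          simp [hinv u hu, hut]

-- insertBy passes over a prefix it does not go before
theorem pv_insertBy_append (before : String → String → Bool) (x : String)
    (l r : List String) (h : ∀ y ∈ l, before x y = false) :
    PySem.List.insertBy before x (l ++ r) = l ++ PySem.List.insertBy before x r := by
  induction l with
  | nil => simp
  | cons y ys ih =>
    have hy : before x y = false := h y (by simp)
    simp only [List.cons_append, PySem.List.insertBy, hy]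
    simp only [Bool.false_eq_true, if_false]
    rw [ih (fun z hz => h z (by simp [hz]))]

theorem pv_insertBy_front (before : String → String → Bool) (x : String)
    (l : List String) (h : ∀ y ∈ l, before x y = true) :
    PySem.List.insertBy before x l = x :: l := by
  cases l with
  | nil => rfl
  | cons y ys => simp [PySem.List.insertBy, h y (by simp)]

-- the stable sort by the 3-valued key is the concatenation of the three buckets
theorem pv_sorted_buckets (ys : List String) :
    PySem.List.sorted ys pvPrio
      = ys.filter (fun t => pvPrio t == 0) ++ ys.filter (fun t => pvPrio t == 1)
          ++ ys.filter (fun t => pvPrio t == 2) := by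
  rw [PySem.List.sorted_eq_foldl_insertBy]
  induction ys using List.reverseRecOn with
  | nil => simp
  | append_singleton zs x ih =>
    rw [List.foldl_append, List.foldl_cons, List.foldl_nil, ih]
    have hmem0 : ∀ y ∈ zs.filter (fun t => pvPrio t == 0), pvPrio y = 0 := by
      intro y hy; simpa using (List.of_mem_filter hy)
    have hmem1 : ∀ y ∈ zs.filter (fun t => pvPrio t == 1), pvPrio y = 1 := by
      intro y hy; simpa using (List.of_mem_filter hy)
    have hmem2 : ∀ y ∈ zs.filter (fun t => pvPrio t == 2), pvPrio y = 2 := by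
      intro y hy; simpa using (List.of_mem_filter hy)
    have hrange : pvPrio x = 0 ∨ pvPrio x = 1 ∨ pvPrio x = 2 := by
      unfold pvPrio; split_ifs <;> simp
    set before := fun a b => decide (pvPrio a < pvPrio b) with hbef
    rcases hrange with h | h | h
    · rw [List.append_assoc,
          pv_insertBy_append before x _ _ (by intro y hy; simp [hbef, h, hmem0 y hy]),
          pv_insertBy_front before x _ (by
            intro y hy
            rcases List.mem_append.mp hy with hy | hy
            · simp [hbef, h, hmem1 y hy]
            · simp [hbef, h, hmem2 y hy])]
      simp [List.filter_append, h, List.append_assoc]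
    · rw [pv_insertBy_append before x _ _ (by
            intro y hy
            rcases List.mem_append.mp hy with hy | hy
            · simp [hbef, h, hmem0 y hy]
            · simp [hbef, h, hmem1 y hy]),
          pv_insertBy_front before x _ (by intro y hy; simp [hbef, h, hmem2 y hy])]
      simp [List.filter_append, h, List.append_assoc]
    · rw [show (zs.filter (fun t => pvPrio t == 0) ++ zs.filter (fun t => pvPrio t == 1)
            ++ zs.filter (fun t => pvPrio t == 2))
          = (zs.filter (fun t => pvPrio t == 0) ++ zs.filter (fun t => pvPrio t == 1)
            ++ zs.filter (fun t => pvPrio t == 2)) ++ [] from by simp,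
          pv_insertBy_append before x _ [] (by
            intro y hy
            rcases List.mem_append.mp hy with hy | hy
            · rcases List.mem_append.mp hy with hy | hy
              · simp [hbef, h, hmem0 y hy]
              · simp [hbef, h, hmem1 y hy]
            · simp [hbef, h, hmem2 y hy])]
      simp [PySem.List.insertBy, List.filter_append, h, List.append_assoc]

-- B's loop computes the three priority buckets of the pvKeep2-filtered survivors
theorem altLoop_eq (terms : List String) :
    ∀ (seen b0 b1 b2 : List String),
      altLoop terms seen (b0, b1, b2)
        = (b0 ++ ((pvSurv seen terms).filter pvKeep2).filter (fun t => pvPrio t == 0))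
          ++ (b1 ++ ((pvSurv seen terms).filter pvKeep2).filter (fun t => pvPrio t == 1))
          ++ (b2 ++ ((pvSurv seen terms).filter pvKeep2).filter (fun t => pvPrio t == 2)) := by
  induction terms with
  | nil => intro seen b0 b1 b2; simp [altLoop, pvSurv]
  | cons t rest ih =>
    intro seen b0 b1 b2
    by_cases he : t = ""
    · rw [show altLoop (t :: rest) seen (b0, b1, b2) = altLoop rest seen (b0, b1, b2) from by
            simp [altLoop, he],
          pvSurv_skip rest (Or.inl he)]
      exact ih seen b0 b1 b2
    · by_cases hs : t ∈ seen
      · rw [show altLoop (t :: rest) seen (b0, b1, b2) = altLoop rest seen (b0, b1, b2) from by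
              simp [altLoop, he, hs],
            pvSurv_skip rest (Or.inr hs)]
        exact ih seen b0 b1 b2
      · rw [pvSurv_cons rest he hs]
        have hadd : PySem.Set.add seen t = seen ++ [t] := by simp [PySem.Set.add, hs]
        by_cases hsk : t ∈ altSkip
        · have hc : altSkip.contains t = true := by simpa using hsk
          have hk2f : pvKeep2 t = false := by
            have h := pv_skip_keep2 t; rw [hc] at h; simpa using h.symm
          rw [show altLoop (t :: rest) seen (b0, b1, b2)
                = altLoop rest (seen ++ [t]) (b0, b1, b2) from by
                simp [altLoop, he, hs, hsk, hadd],
              List.filter_cons_of_neg (by simp [hk2f])]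
          exact ih (seen ++ [t]) b0 b1 b2
        · have hc : altSkip.contains t = false := by simpa using hsk
          have hk2 : pvKeep2 t = true := by
            have h := pv_skip_keep2 t; rw [hc] at h; simpa using h.symm
          rw [List.filter_cons_of_pos hk2]
          by_cases h0 : t ∈ altRank0
          · have hor := pv_rank0_eq t
            simp only [h0, List.contains_eq_mem, decide_true, Bool.true_eq,
              Bool.or_eq_true, PySem.Set.contains_eq_listContains, decide_eq_true_eq] at hor
            have hp0 : pvPrio t = 0 := by rcases hor with h | h <;> simp [pvPrio, h]
            have hr0 : altRank t = 0 := by simp [altRank, h0]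
            rw [show altLoop (t :: rest) seen (b0, b1, b2)
                  = altLoop rest (seen ++ [t]) (b0 ++ [t], b1, b2) from by
                  simp [altLoop, he, hs, hsk, hr0],
                ih (seen ++ [t]) (b0 ++ [t]) b1 b2,
                List.filter_cons_of_pos (by simp [hp0]),
                List.filter_cons_of_neg (by simp [hp0]),
                List.filter_cons_of_neg (by simp [hp0])]
            simp [List.append_assoc]
          · have hnor := pv_rank0_eq t
            simp only [h0, List.contains_eq_mem, decide_false, Bool.false_eq,
              Bool.or_eq_false_iff, PySem.Set.contains_eq_listContains,
              decide_eq_false_iff_not] at hnor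
            by_cases h1 : t ∈ altRank1
            · have hob := pv_rank1_eq t
              simp only [h1, List.contains_eq_mem, decide_true, Bool.true_eq,
                PySem.Set.contains_eq_listContains, decide_eq_true_eq] at hob
              have hp1 : pvPrio t = 1 := by simp [pvPrio, hnor.1, hnor.2, hob]
              have hr1 : altRank t = 1 := by simp [altRank, h0, h1]
              rw [show altLoop (t :: rest) seen (b0, b1, b2)
                    = altLoop rest (seen ++ [t]) (b0, b1 ++ [t], b2) from by
                    simp [altLoop, he, hs, hsk, hr1],
                  ih (seen ++ [t]) b0 (b1 ++ [t]) b2,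
                  List.filter_cons_of_neg (by simp [hp1]),
                  List.filter_cons_of_pos (by simp [hp1]),
                  List.filter_cons_of_neg (by simp [hp1])]
              simp [List.append_assoc]
            · have hnob := pv_rank1_eq t
              simp only [h1, List.contains_eq_mem, decide_false, Bool.false_eq,
                PySem.Set.contains_eq_listContains, decide_eq_false_iff_not] at hnob
              have hp2 : pvPrio t = 2 := by simp [pvPrio, hnor.1, hnor.2, hnob]
              have hr2 : altRank t = 2 := by simp [altRank, h0, h1]
              rw [show altLoop (t :: rest) seen (b0, b1, b2)
                    = altLoop rest (seen ++ [t]) (b0, b1, b2 ++ [t]) from by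
                    simp [altLoop, he, hs, hsk, hr2],
                  ih (seen ++ [t]) b0 b1 (b2 ++ [t]),
                  List.filter_cons_of_neg (by simp [hp2]),
                  List.filter_cons_of_neg (by simp [hp2]),
                  List.filter_cons_of_pos (by simp [hp2])]
              simp [List.append_assoc]

-- ===== VERDICT (by name: the statement is the Claim_ definition above) =====
theorem clean_title_terms_py_spec : Claim_equal_clean_title_terms_py := by
  intro terms _
  unfold Spec_clean_title_terms_py clean_title_terms_py clean_title_terms_py_alt
  simp only [pvA_body_eq]
  rw [show (List.foldl (fun acc t => if pvKeep t then acc ++ [t] else acc) [] terms)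
        = terms.filter pvKeep from by
        simpa using PySem.List.foldl_append_if pvKeep (fun t => t) terms []]
  rw [show PySem.List.dedup (terms.filter pvKeep)
        = (pvSurv [] terms).filter pvKeep2 from by
        simpa [PySem.List.dedup, PySem.Set.ofList, PySem.Set.empty]
          using pvSurv_invariant terms [] [] (by simp)]
  rw [pv_sorted_buckets, altLoop_eq terms PySem.Set.empty [] [] []]
  simp [PySem.Set.empty]
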